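-- pv_equiv track=rewrite | github.com/KAnanev/python_files | polygon/hexlet/lists_ascending_sequence.py | is_continuous_sequence
-- ===== SOURCE A (Python) =====
-- def is_continuous_sequence(lst):
--     if len(lst) <= 1:
--         return False
--     numb = lst[0]
--     count = lst[0]
--     for i in range(len(lst)-1):
--         count += 1
--         numb += count
--     return numb == sum(lst)
-- ===== SOURCE B (Python) =====
-- def is_continuous_sequence(lst):
--     n = len(lst)
--     if n <= 1:
--         return False
--     return sum(lst) == n * lst[0] + n * (n - 1) // 2
-- ===== Notes on version B (the rewrite author's own statement) =====
-- stated objective: simpler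
-- what changed: Replaces A's accumulation loop building lst[0]+(lst[0]+1)+...+(lst[0]+n-1) with the closed-form arithmetic-series sum n*lst[0] + n*(n-1)//2 compared against sum(lst).
import Mathlib
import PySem

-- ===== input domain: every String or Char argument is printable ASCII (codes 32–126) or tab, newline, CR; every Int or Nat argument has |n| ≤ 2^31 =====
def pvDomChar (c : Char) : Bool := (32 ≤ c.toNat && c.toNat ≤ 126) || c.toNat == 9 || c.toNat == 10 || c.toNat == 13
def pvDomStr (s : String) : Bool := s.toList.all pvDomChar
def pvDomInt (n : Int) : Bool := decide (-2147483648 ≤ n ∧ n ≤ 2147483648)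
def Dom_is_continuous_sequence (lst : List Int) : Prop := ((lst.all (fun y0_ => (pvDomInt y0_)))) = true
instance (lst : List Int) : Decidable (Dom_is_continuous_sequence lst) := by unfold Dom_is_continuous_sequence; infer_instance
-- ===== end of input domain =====

-- B replaces A's accumulation loop with the closed-form arithmetic-series sum n*lst[0] + n*(n-1)//2 (simpler).


-- ===== PORT A =====
-- literal transliteration: numb = count = lst[0]; for i in range(len(lst)-1): count += 1; numb += count; return numb == sum(lst)
def is_continuous_sequence (lst : List Int) : Bool :=
  if lst.length ≤ 1 then false
  else
    let numb : Int := lst.headI          -- lst[0]; guarded by len > 1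
    let count : Int := lst.headI
    let st := (PySem.List.pyRange 0 ((lst.length : Int) - 1) 1).foldl
      (fun (s : Int × Int) _ => (s.1 + 1, s.2 + (s.1 + 1))) (count, numb)
    decide (st.2 = lst.sum)

-- ===== PORT B =====
def is_continuous_sequence_alt (lst : List Int) : Bool :=
  let n : Int := lst.length
  if n ≤ 1 then false
  else decide (lst.sum = n * lst.headI + PySem.Int.floordiv (n * (n - 1)) 2)

-- ===== PRECONDITION & SPEC =====
def Spec_is_continuous_sequence (lst : List Int) (out : Bool) : Prop := out = is_continuous_sequence_alt lst
instance (lst : List Int) (out : Bool) : Decidable (Spec_is_continuous_sequence lst out) := by unfold Spec_is_continuous_sequence; infer_instance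

-- ===== CLAIM (what is proved, stated in full; the proofs are below) =====
def Claim_equal_is_continuous_sequence : Prop := ∀ (lst : List Int), Dom_is_continuous_sequence lst → Spec_is_continuous_sequence lst (is_continuous_sequence lst)

-- ===== LEMMAS AND PROOFS =====

-- A's loop: after k iterations starting from (c, m), count = c + k and 2*numb = 2*m + k*(2*c + k + 1).
theorem pvFoldPair (l : List Int) : ∀ c m : Int,
    ((l.foldl (fun (s : Int × Int) _ => (s.1 + 1, s.2 + (s.1 + 1))) (c, m)).1 = c + l.length) ∧
    (2 * (l.foldl (fun (s : Int × Int) _ => (s.1 + 1, s.2 + (s.1 + 1))) (c, m)).2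
      = 2 * m + (l.length : Int) * (2 * c + l.length + 1)) := by
  induction l with
  | nil => intro c m; simp
  | cons a t ih =>
    intro c m
    have h := ih (c + 1) (m + (c + 1))
    simp only [List.foldl_cons, List.length_cons] at *
    constructor
    · rw [h.1]; push_cast; ring
    · rw [h.2]; push_cast; ring

theorem pvMain : ∀ (lst : List Int), is_continuous_sequence lst = is_continuous_sequence_alt lst := by
  intro lst
  unfold is_continuous_sequence is_continuous_sequence_alt
  by_cases h1 : lst.length ≤ 1
  · simp [h1, show ((lst.length : Int) ≤ 1) from by exact_mod_cast h1]
  · have h1' : ¬ ((lst.length : Int) ≤ 1) := by exact_mod_cast h1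
    simp only [h1, h1', if_false]
    set n : Int := (lst.length : Int) with hn
    have hn2 : 2 ≤ n := by omega
    have hlen : ((PySem.List.pyRange 0 (n - 1) 1).length : Int) = n - 1 := by
      rw [PySem.List.length_pyRange_one]; omega
    have h := pvFoldPair (PySem.List.pyRange 0 (n - 1) 1) lst.headI lst.headI
    set st := (PySem.List.pyRange 0 (n - 1) 1).foldl
      (fun (s : Int × Int) _ => (s.1 + 1, s.2 + (s.1 + 1))) (lst.headI, lst.headI) with hst
    -- the closed form in B
    have hdvd : (2 : Int) ∣ n * (n - 1) := by
      rcases Int.even_mul_succ_self (n - 1) with ⟨k, hk⟩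
      exact ⟨k, by linarith [hk]⟩
    have hfd : 2 * PySem.Int.floordiv (n * (n - 1)) 2 = n * (n - 1) := by
      rw [PySem.Int.floordiv_eq_ediv_of_pos (by norm_num)]
      exact Int.mul_ediv_cancel' hdvd
    have hkey : st.2 = n * lst.headI + PySem.Int.floordiv (n * (n - 1)) 2 := by
      have h2 := h.2
      rw [hlen] at h2
      nlinarith [h2, hfd]
    rw [hkey]
    simp [eq_comm]

-- ===== VERDICT (by name: the statement is the Claim_ definition above) =====
theorem is_continuous_sequence_spec : Claim_equal_is_continuous_sequence := by
  intro lst _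
  unfold Spec_is_continuous_sequence
  exact pvMain lst
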